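-- pv_equiv track=rewrite | github.com/the-lost-mahiro/My-LeetCode-Portfolio | practice/4198-longest-alternating-subarray-after-removing-at-most-one-element/solution.py | longestAlternating
-- ===== SOURCE A (Python) =====
-- from typing import List
--
-- def longestAlternating(nums: List[int]) -> int:
--     n = len(nums)
--     if n == 1:
--         return 1
--
--     dpLi, dpLd, dpRi, dpRd = [1] * n, [1] * n, [1] * n, [1] * n
--
--     for i in range(1, n):
--         if nums[i - 1] > nums[i]:
--             dpLi[i] = dpLd[i - 1] + 1
--         elif nums[i - 1] < nums[i]:
--             dpLd[i] = dpLi[i - 1] + 1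
--
--     for i in range(n - 2, -1, -1):
--         if nums[i] < nums[i + 1]:
--             dpRd[i] = dpRi[i + 1] + 1
--         elif nums[i] > nums[i + 1]:
--             dpRi[i] = dpRd[i + 1] + 1
--
--     maxi = max(max(dpLi), max(dpLd), max(dpRi), max(dpRd))
--
--     for i in range(1, n - 1):
--         if nums[i - 1] > nums[i + 1]:
--             maxi = max(maxi, dpLd[i - 1] + dpRd[i + 1])
--         elif nums[i - 1] < nums[i + 1]:
--             maxi = max(maxi, dpLi[i - 1] + dpRi[i + 1])
--
--     return maxi
-- ===== SOURCE B (Python) =====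
-- from typing import List
--
-- def longestAlternating(nums: List[int]) -> int:
--     # One forward pass with O(1) state: (u0,d0) = longest alternating run ending
--     # at i with last step up/down and no deletion; (u1,d1) = same with one
--     # interior element deleted (0 = impossible); (pu,pd) = (u0,d0) at i-2.
--     n = len(nums)
--     u0 = d0 = 1
--     u1 = d1 = 0
--     pu = pd = 1
--     best = 1
--     for i in range(1, n):
--         a, b = nums[i - 1], nums[i]
--         nu0 = d0 + 1 if a < b else 1
--         nd0 = u0 + 1 if a > b else 1
--         nu1 = d1 + 1 if (a < b and d1 > 0) else 0
--         nd1 = u1 + 1 if (a > b and u1 > 0) else 0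
--         if i >= 2:
--             c = nums[i - 2]
--             if c < b:
--                 nu1 = max(nu1, pd + 1)
--             elif c > b:
--                 nd1 = max(nd1, pu + 1)
--         pu, pd = u0, d0
--         u0, d0, u1, d1 = nu0, nd0, nu1, nd1
--         best = max(best, u0, d0, u1, d1)
--     return best
-- ===== Notes on version B (the rewrite author's own statement) =====
-- stated objective: alternative
-- what changed: A builds four length-n DP arrays in a forward and a backward pass and then scans for merge points; B is a single forward pass keeping four O(1) state variables (run lengths ending at i with 0 or 1 interior deletion) plus a running maximum, so the backward arrays and the merge loop disappear.
-- outside the precondition, e.g. on longestAlternating([]): A raises ValueError, B returns 1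
import Mathlib
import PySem

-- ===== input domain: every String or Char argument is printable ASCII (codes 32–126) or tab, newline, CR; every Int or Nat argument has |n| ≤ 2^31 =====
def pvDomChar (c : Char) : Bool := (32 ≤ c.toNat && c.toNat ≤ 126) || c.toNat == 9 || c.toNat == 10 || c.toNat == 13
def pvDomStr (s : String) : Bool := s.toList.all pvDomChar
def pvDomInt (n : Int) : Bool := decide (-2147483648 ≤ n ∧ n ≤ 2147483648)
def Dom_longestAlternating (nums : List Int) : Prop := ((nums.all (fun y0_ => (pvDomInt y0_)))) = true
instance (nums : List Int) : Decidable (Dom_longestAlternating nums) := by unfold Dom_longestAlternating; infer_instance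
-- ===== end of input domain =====

-- B replaces A's three-pass DP (forward arrays, backward arrays, merge scan) by a single
-- forward pass over four O(1) state variables (run lengths with 0 or 1 interior deletion).

-- ===== PORT A =====
-- Python list indices in the loops are nonnegative and in range, so pyGetD/pySetD are exact there.
-- the loop bodies of A's three passes, as named helpers (state = the dp lists / running max)
def aFwdStep (nums : List Int) (s : List Int × List Int) (i : Int) : List Int × List Int :=
  if PySem.List.pyGetD nums (i - 1) 0 > PySem.List.pyGetD nums i 0 then
    (PySem.List.pySetD s.1 i (PySem.List.pyGetD s.2 (i - 1) 0 + 1), s.2)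
  else if PySem.List.pyGetD nums (i - 1) 0 < PySem.List.pyGetD nums i 0 then
    (s.1, PySem.List.pySetD s.2 i (PySem.List.pyGetD s.1 (i - 1) 0 + 1))
  else s

def aBwdStep (nums : List Int) (s : List Int × List Int) (i : Int) : List Int × List Int :=
  if PySem.List.pyGetD nums i 0 < PySem.List.pyGetD nums (i + 1) 0 then
    (s.1, PySem.List.pySetD s.2 i (PySem.List.pyGetD s.1 (i + 1) 0 + 1))
  else if PySem.List.pyGetD nums i 0 > PySem.List.pyGetD nums (i + 1) 0 then
    (PySem.List.pySetD s.1 i (PySem.List.pyGetD s.2 (i + 1) 0 + 1), s.2)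
  else s

def aMergeStep (nums dpLi dpLd dpRi dpRd : List Int) (m i : Int) : Int :=
  if PySem.List.pyGetD nums (i - 1) 0 > PySem.List.pyGetD nums (i + 1) 0 then
    max m (PySem.List.pyGetD dpLd (i - 1) 0 + PySem.List.pyGetD dpRd (i + 1) 0)
  else if PySem.List.pyGetD nums (i - 1) 0 < PySem.List.pyGetD nums (i + 1) 0 then
    max m (PySem.List.pyGetD dpLi (i - 1) 0 + PySem.List.pyGetD dpRi (i + 1) 0)
  else m

def longestAlternating (nums : List Int) : Int :=
  let n := nums.length
  if n = 1 then 1 else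
  let dp0 : List Int := List.replicate n 1
  let fwd := (PySem.List.pyRange 1 (n : Int) 1).foldl (aFwdStep nums) (dp0, dp0)
  let dpLi := fwd.1
  let dpLd := fwd.2
  let bwd := (PySem.List.pyRange ((n : Int) - 2) (-1) (-1)).foldl (aBwdStep nums) (dp0, dp0)
  let dpRi := bwd.1
  let dpRd := bwd.2
  -- max(xs) raises on the empty list; inputs with n = 0 are excluded by Pre_, so getD is exact here
  let maxi := max (max ((PySem.List.max? dpLi (fun y => y)).getD 0)
                       ((PySem.List.max? dpLd (fun y => y)).getD 0))
                  (max ((PySem.List.max? dpRi (fun y => y)).getD 0)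
                       ((PySem.List.max? dpRd (fun y => y)).getD 0))
  let maxi := (PySem.List.pyRange 1 ((n : Int) - 1) 1).foldl (aMergeStep nums dpLi dpLd dpRi dpRd) maxi
  maxi

-- ===== PORT B =====
structure BState where
  u0 : Int
  d0 : Int
  u1 : Int
  d1 : Int
  pu : Int
  pd : Int
  best : Int
deriving Repr, DecidableEq

def bStep (nums : List Int) (s : BState) (i : Int) : BState :=
  let a := PySem.List.pyGetD nums (i - 1) 0
  let b := PySem.List.pyGetD nums i 0
  let nu0 := if a < b then s.d0 + 1 else 1
  let nd0 := if a > b then s.u0 + 1 else 1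
  let nu1 := if a < b ∧ s.d1 > 0 then s.d1 + 1 else 0
  let nd1 := if a > b ∧ s.u1 > 0 then s.u1 + 1 else 0
  let seeded :=
    if 2 ≤ i then
      let c := PySem.List.pyGetD nums (i - 2) 0
      if c < b then (max nu1 (s.pd + 1), nd1)
      else if c > b then (nu1, max nd1 (s.pu + 1))
      else (nu1, nd1)
    else (nu1, nd1)
  { u0 := nu0, d0 := nd0, u1 := seeded.1, d1 := seeded.2, pu := s.u0, pd := s.d0,
    best := max s.best (max nu0 (max nd0 (max seeded.1 seeded.2))) }

def longestAlternating_alt (nums : List Int) : Int :=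
  let n := nums.length
  let s := (PySem.List.pyRange 1 (n : Int) 1).foldl (bStep nums)
    { u0 := 1, d0 := 1, u1 := 0, d1 := 0, pu := 1, pd := 1, best := 1 }
  s.best

-- ===== PRECONDITION & SPEC =====
-- Pre_ excludes only the empty list, on which A raises ValueError (max of an empty array).
def Pre_longestAlternating (nums : List Int) : Prop := nums ≠ []
instance (nums : List Int) : Decidable (Pre_longestAlternating nums) := by
  unfold Pre_longestAlternating; infer_instance
def pvWitness_longestAlternating : List Int := [3, 1, 4, 1, 5]

def Spec_longestAlternating (nums : List Int) (out : Int) : Prop := out = longestAlternating_alt nums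
instance (nums : List Int) (out : Int) : Decidable (Spec_longestAlternating nums out) := by
  unfold Spec_longestAlternating; infer_instance

-- ===== CLAIM (what is proved, stated in full; the proofs are below) =====
def Claim_equal_longestAlternating : Prop := ∀ (nums : List Int), Dom_longestAlternating nums → Pre_longestAlternating nums → Spec_longestAlternating nums (longestAlternating nums)

-- ===== LEMMAS AND PROOFS =====

-- element access (indices used are < length; getD 0 beyond is harmless in the spec layer)
def gEl (xs : List Int) (t : ℕ) : Int := xs.getD t 0

-- forward no-deletion DP: (FL xs t).1 = A's dpLi[t] (run ending at t, last step down),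
-- (FL xs t).2 = A's dpLd[t] (last step up)
def FL (xs : List Int) : ℕ → Int × Int
  | 0 => (1, 1)
  | t+1 =>
      ((if gEl xs t > gEl xs (t+1) then (FL xs t).2 + 1 else 1),
       (if gEl xs t < gEl xs (t+1) then (FL xs t).1 + 1 else 1))

-- backward DP: (FR xs t).1 = A's dpRi[t] (run starting at t, first step down), .2 = dpRd[t]
def FR (xs : List Int) (t : ℕ) : Int × Int :=
  if h : t + 1 < xs.length then
    ((if gEl xs t > gEl xs (t+1) then (FR xs (t+1)).2 + 1 else 1),
     (if gEl xs t < gEl xs (t+1) then (FR xs (t+1)).1 + 1 else 1))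
  else (1, 1)
termination_by xs.length - t

-- B's one-deletion states at index t: (u1, d1); 0 = impossible
def GB (xs : List Int) : ℕ → Int × Int
  | 0 => (0, 0)
  | t+1 =>
      let a := gEl xs t
      let b := gEl xs (t+1)
      let p := GB xs t
      let nu1 := if a < b ∧ p.2 > 0 then p.2 + 1 else 0
      let nd1 := if a > b ∧ p.1 > 0 then p.1 + 1 else 0
      if 1 ≤ t then
        let c := gEl xs (t-1)
        if c < b then (max nu1 ((FL xs (t-1)).1 + 1), nd1)
        else if c > b then (nu1, max nd1 ((FL xs (t-1)).2 + 1))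
        else (nu1, nd1)
      else (nu1, nd1)

-- B's running best after processing indices 1..t
def Bbest (xs : List Int) : ℕ → Int
  | 0 => 1
  | t+1 => max (Bbest xs t)
      (max (if gEl xs t < gEl xs (t+1) then (FL xs t).1 + 1 else 1)
        (max (if gEl xs t > gEl xs (t+1) then (FL xs t).2 + 1 else 1)
          (max (GB xs (t+1)).1 (GB xs (t+1)).2)))

def bState (xs : List Int) (t : ℕ) : BState :=
  { u0 := (FL xs t).2, d0 := (FL xs t).1, u1 := (GB xs t).1, d1 := (GB xs t).2,
    pu := (FL xs (t-1)).2, pd := (FL xs (t-1)).1, best := Bbest xs t }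

lemma bStep_state (xs : List Int) (t : ℕ) :
    bStep xs (bState xs t) ((t : Int) + 1) = bState xs (t + 1) := by
  have h2 : PySem.List.pyGetD xs ((t : Int) + 1 - 1) 0 = gEl xs t := by
    rw [show ((t : Int) + 1 - 1) = (t : Int) by omega, PySem.List.pyGetD_natCast]; rfl
  have h3 : PySem.List.pyGetD xs ((t : Int) + 1) 0 = gEl xs (t + 1) := by
    rw [show ((t : Int) + 1) = ((t + 1 : ℕ) : Int) by push_cast; ring, PySem.List.pyGetD_natCast]; rfl
  by_cases ht : 1 ≤ t
  · have h4 : PySem.List.pyGetD xs ((t : Int) + 1 - 2) 0 = gEl xs (t - 1) := by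
      rw [show ((t : Int) + 1 - 2) = ((t - 1 : ℕ) : Int) by omega, PySem.List.pyGetD_natCast]; rfl
    have h5 : (2 : Int) ≤ (t : Int) + 1 := by omega
    show bStep xs (bState xs t) ((t : Int) + 1) = _
    simp only [bStep, bState, h2, h3, h4, if_pos h5]
    simp only [GB, Bbest, FL, if_pos ht, Nat.add_sub_cancel]
  · have ht0 : t = 0 := by omega
    subst ht0
    have h5 : ¬ (2 : Int) ≤ (0 : Int) + 1 := by omega
    simp only [bStep, bState, h2, h3]
    simp only [GB, Bbest, FL, Nat.zero_sub]
    rfl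

lemma b_fold (xs : List Int) : ∀ t : ℕ,
    (PySem.List.pyRange 1 ((t : Int) + 1) 1).foldl (bStep xs)
      { u0 := 1, d0 := 1, u1 := 0, d1 := 0, pu := 1, pd := 1, best := 1 } = bState xs t := by
  intro t
  induction t with
  | zero =>
      rw [PySem.List.pyRange_one_eq_nil (by omega)]
      simp [bState, FL, GB, Bbest]
  | succ t ih =>
      rw [show (((t+1 : ℕ) : Int) + 1) = ((t : Int) + 1) + 1 by push_cast; ring,
        PySem.List.pyRange_one_succ_right (by omega), List.foldl_append]
      simp only [List.foldl_cons, List.foldl_nil, ih]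
      exact bStep_state xs t

lemma b_val (xs : List Int) (h : xs ≠ []) :
    longestAlternating_alt xs = Bbest xs (xs.length - 1) := by
  have hn : 1 ≤ xs.length := List.length_pos_iff.mpr h
  show ((PySem.List.pyRange 1 ((xs.length : Int)) 1).foldl (bStep xs)
      { u0 := 1, d0 := 1, u1 := 0, d1 := 0, pu := 1, pd := 1, best := 1 }).best = _
  rw [show ((xs.length : Int)) = ((xs.length - 1 : ℕ) : Int) + 1 by omega, b_fold]
  rfl



-- small getD/set/mem helpers used by the array-invariant proofs
lemma getD_set_eq (l : List Int) (i : ℕ) (v : Int) (h : i < l.length) :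
    (l.set i v).getD i 0 = v := by
  simp [List.getD_eq_getElem?_getD, h]

lemma getD_set_ne (l : List Int) (i j : ℕ) (v : Int) (h : i ≠ j) :
    (l.set i v).getD j 0 = l.getD j 0 := by
  simp [List.getD_eq_getElem?_getD, List.getElem?_set_ne, h]

lemma getD_mem (l : List Int) (t : ℕ) (h : t < l.length) : l.getD t 0 ∈ l := by
  rw [List.getD_eq_getElem l 0 h]; exact List.getElem_mem h

lemma mem_getD (l : List Int) (y : Int) (h : y ∈ l) : ∃ t, t < l.length ∧ l.getD t 0 = y := by
  obtain ⟨t, ht, rfl⟩ := List.mem_iff_getElem.mp h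
  exact ⟨t, ht, List.getD_eq_getElem l 0 ht⟩

-- generic bounds for a running-max fold
lemma foldl_ge_init (f : Int → Int → Int) (hf : ∀ m i, m ≤ f m i) :
    ∀ (l : List Int) (a : Int), a ≤ l.foldl f a := by
  intro l
  induction l with
  | nil => intro a; simp
  | cons x l ih => intro a; exact le_trans (hf a x) (ih (f a x))

lemma foldl_elem_le (f : Int → Int → Int) (hf : ∀ m i, m ≤ f m i) (l : List Int)
    (i : Int) (v : Int) (hv : ∀ m, v ≤ f m i) :
    ∀ a, i ∈ l → v ≤ l.foldl f a := by
  induction l with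
  | nil => intro a hi; simp at hi
  | cons x l ih =>
      intro a hi
      rcases List.mem_cons.mp hi with rfl | hi'
      · exact le_trans (hv a) (foldl_ge_init f hf l (f a i))
      · exact ih (f a x) hi'


lemma foldl_le_bound (f : Int → Int → Int) (l : List Int) (c : Int)
    (hstep : ∀ m i, i ∈ l → m ≤ c → f m i ≤ c) :
    ∀ a, a ≤ c → l.foldl f a ≤ c := by
  induction l with
  | nil => intro a ha; simpa using ha
  | cons x l ih =>
      intro a ha
      exact ih (fun m i hi hm => hstep m i (List.mem_cons_of_mem _ hi) hm) (f a x)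
        (hstep a x List.mem_cons_self ha)

-- invariant of A's forward pass: after processing indices 1..m-1 the dp lists hold FL below m
def InvF (xs : List Int) (m : ℕ) (s : List Int × List Int) : Prop :=
  s.1.length = xs.length ∧ s.2.length = xs.length ∧
  ∀ t, t < xs.length →
    s.1.getD t 0 = (if t < m then (FL xs t).1 else 1) ∧
    s.2.getD t 0 = (if t < m then (FL xs t).2 else 1)

lemma invF_step (xs : List Int) (m : ℕ) (s : List Int × List Int)
    (h1 : 1 ≤ m) (hm : m < xs.length) (hs : InvF xs m s) :
    InvF xs (m + 1) (aFwdStep xs s (m : Int)) := by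
  obtain ⟨hl1, hl2, hE⟩ := hs
  have hgm : PySem.List.pyGetD xs ((m : Int) - 1) 0 = gEl xs (m - 1) := by
    rw [show ((m : Int) - 1) = ((m - 1 : ℕ) : Int) by omega, PySem.List.pyGetD_natCast]; rfl
  have hgm' : PySem.List.pyGetD xs (m : Int) 0 = gEl xs m := by
    rw [PySem.List.pyGetD_natCast]; rfl
  have hm1 : m - 1 < xs.length := by omega
  have hm1m : ¬ (m ≤ m - 1) := by omega
  have hr1 : PySem.List.pyGetD s.1 ((m : Int) - 1) 0 = (FL xs (m - 1)).1 := by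
    rw [show ((m : Int) - 1) = ((m - 1 : ℕ) : Int) by omega, PySem.List.pyGetD_natCast]
    have := (hE (m - 1) hm1).1
    simpa [show m - 1 < m by omega] using this
  have hr2 : PySem.List.pyGetD s.2 ((m : Int) - 1) 0 = (FL xs (m - 1)).2 := by
    rw [show ((m : Int) - 1) = ((m - 1 : ℕ) : Int) by omega, PySem.List.pyGetD_natCast]
    have := (hE (m - 1) hm1).2
    simpa [show m - 1 < m by omega] using this
  have hFL : FL xs m = ((if gEl xs (m-1) > gEl xs m then (FL xs (m-1)).2 + 1 else 1),
      (if gEl xs (m-1) < gEl xs m then (FL xs (m-1)).1 + 1 else 1)) := by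
    rw [show m = (m - 1) + 1 by omega]
    simp [FL, show m - 1 + 1 = m by omega]
  unfold aFwdStep
  rw [hgm, hgm']
  rcases lt_trichotomy (gEl xs (m-1)) (gEl xs m) with h | h | h
  · rw [if_neg (by omega), if_pos h]
    refine ⟨by simpa using hl1, by simpa using hl2, fun t ht => ⟨?_, ?_⟩⟩
    · rcases Nat.lt_trichotomy t m with h' | rfl | h'
      · rw [(hE t ht).1]; simp [h', show t < m + 1 by omega]
      · rw [(hE t ht).1]
        simp only [lt_irrefl, if_false, Nat.lt_succ_self, if_true, hFL]
        simp [not_lt_of_gt h]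
      · rw [(hE t ht).1]; simp [show ¬ t < m by omega, show ¬ t < m + 1 by omega]
    · rw [hr1, PySem.List.pySetD_natCast]
      rcases Nat.lt_trichotomy t m with h' | rfl | h'
      · rw [getD_set_ne _ _ _ _ (by omega), (hE t ht).2]; simp [h', show t < m + 1 by omega]
      · rw [getD_set_eq _ _ _ (by omega : t < s.2.length)]
        simp [hFL, h]
      · rw [getD_set_ne _ _ _ _ (by omega), (hE t ht).2]
        simp [show ¬ t < m by omega, show ¬ t < m + 1 by omega]
  · rw [if_neg (by omega), if_neg (by omega)]
    refine ⟨hl1, hl2, fun t ht => ⟨?_, ?_⟩⟩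
    · rw [(hE t ht).1]
      rcases Nat.lt_trichotomy t m with h' | rfl | h'
      · simp [h', show t < m + 1 by omega]
      · simp [hFL, h]
      · simp [show ¬ t < m by omega, show ¬ t < m + 1 by omega]
    · rw [(hE t ht).2]
      rcases Nat.lt_trichotomy t m with h' | rfl | h'
      · simp [h', show t < m + 1 by omega]
      · simp [hFL, h]
      · simp [show ¬ t < m by omega, show ¬ t < m + 1 by omega]
  · rw [if_pos h]
    refine ⟨by simpa using hl1, by simpa using hl2, fun t ht => ⟨?_, ?_⟩⟩
    · rw [hr2, PySem.List.pySetD_natCast]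
      rcases Nat.lt_trichotomy t m with h' | rfl | h'
      · rw [getD_set_ne _ _ _ _ (by omega), (hE t ht).1]; simp [h', show t < m + 1 by omega]
      · rw [getD_set_eq _ _ _ (by omega : t < s.1.length)]
        simp [hFL, h]
      · rw [getD_set_ne _ _ _ _ (by omega), (hE t ht).1]
        simp [show ¬ t < m by omega, show ¬ t < m + 1 by omega]
    · rcases Nat.lt_trichotomy t m with h' | rfl | h'
      · rw [(hE t ht).2]; simp [h', show t < m + 1 by omega]
      · rw [(hE t ht).2]
        simp only [lt_irrefl, if_false, Nat.lt_succ_self, if_true, hFL]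
        simp [not_lt_of_gt h]
      · rw [(hE t ht).2]; simp [show ¬ t < m by omega, show ¬ t < m + 1 by omega]

lemma invF_fold (xs : List Int) (m : ℕ) (hm : m ≤ xs.length) (h1 : 1 ≤ m) :
    InvF xs m ((PySem.List.pyRange 1 (m : Int) 1).foldl (aFwdStep xs)
      (List.replicate xs.length 1, List.replicate xs.length 1)) := by
  induction m with
  | zero => omega
  | succ m ih =>
      by_cases hm0 : 1 ≤ m
      · rw [show (((m+1 : ℕ)) : Int) = ((m : Int)) + 1 by push_cast; ring,
          PySem.List.pyRange_one_succ_right (by omega), List.foldl_append]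
        simp only [List.foldl_cons, List.foldl_nil]
        exact invF_step xs m _ hm0 (by omega) (ih (by omega) hm0)
      · have : m = 0 := by omega
        subst this
        rw [show ((1 : ℕ) : Int) = (1 : Int) by norm_num, PySem.List.pyRange_one_eq_nil (by omega)]
        refine ⟨by simp, by simp, fun t ht => ?_⟩
        rcases Nat.eq_zero_or_pos t with rfl | htp
        · simp [ht, FL]
        · simp [ht, show ¬ t < 1 by omega]

-- invariant of A's backward pass: after processing indices n-2..k the dp lists hold FR from k up
def InvR (xs : List Int) (k : ℕ) (s : List Int × List Int) : Prop :=
  s.1.length = xs.length ∧ s.2.length = xs.length ∧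
  ∀ t, t < xs.length →
    s.1.getD t 0 = (if k ≤ t then (FR xs t).1 else 1) ∧
    s.2.getD t 0 = (if k ≤ t then (FR xs t).2 else 1)

lemma invR_step (xs : List Int) (k : ℕ) (s : List Int × List Int)
    (hk : k + 1 < xs.length) (hs : InvR xs (k + 1) s) :
    InvR xs k (aBwdStep xs s (k : Int)) := by
  obtain ⟨hl1, hl2, hE⟩ := hs
  have hgk : PySem.List.pyGetD xs (k : Int) 0 = gEl xs k := by
    rw [PySem.List.pyGetD_natCast]; rfl
  have hgk' : PySem.List.pyGetD xs ((k : Int) + 1) 0 = gEl xs (k + 1) := by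
    rw [show ((k : Int) + 1) = ((k + 1 : ℕ) : Int) by push_cast; ring, PySem.List.pyGetD_natCast]; rfl
  have hr1 : PySem.List.pyGetD s.1 ((k : Int) + 1) 0 = (FR xs (k + 1)).1 := by
    rw [show ((k : Int) + 1) = ((k + 1 : ℕ) : Int) by push_cast; ring, PySem.List.pyGetD_natCast]
    have := (hE (k + 1) hk).1
    simpa using this
  have hr2 : PySem.List.pyGetD s.2 ((k : Int) + 1) 0 = (FR xs (k + 1)).2 := by
    rw [show ((k : Int) + 1) = ((k + 1 : ℕ) : Int) by push_cast; ring, PySem.List.pyGetD_natCast]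
    have := (hE (k + 1) hk).2
    simpa using this
  have hFR : FR xs k = ((if gEl xs k > gEl xs (k+1) then (FR xs (k+1)).2 + 1 else 1),
      (if gEl xs k < gEl xs (k+1) then (FR xs (k+1)).1 + 1 else 1)) := by
    rw [FR]
    simp [hk]
  unfold aBwdStep
  rw [hgk, hgk']
  rcases lt_trichotomy (gEl xs k) (gEl xs (k+1)) with h | h | h
  · rw [if_pos h]
    refine ⟨by simpa using hl1, by simpa using hl2, fun t ht => ⟨?_, ?_⟩⟩
    · rw [(hE t ht).1]
      rcases Nat.lt_trichotomy t k with h' | rfl | h'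
      · simp [show ¬ k + 1 ≤ t by omega, show ¬ k ≤ t by omega]
      · simp [show ¬ t + 1 ≤ t by omega, hFR, not_lt_of_gt h]
      · simp [show k + 1 ≤ t by omega, show k ≤ t by omega]
    · rw [hr1, PySem.List.pySetD_natCast]
      rcases Nat.lt_trichotomy t k with h' | rfl | h'
      · rw [getD_set_ne _ _ _ _ (by omega), (hE t ht).2]
        simp [show ¬ k + 1 ≤ t by omega, show ¬ k ≤ t by omega]
      · rw [getD_set_eq _ _ _ (by omega : t < s.2.length)]
        simp [hFR, h]
      · rw [getD_set_ne _ _ _ _ (by omega), (hE t ht).2]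
        simp [show k + 1 ≤ t by omega, show k ≤ t by omega]
  · rw [if_neg (by omega), if_neg (by omega)]
    refine ⟨hl1, hl2, fun t ht => ⟨?_, ?_⟩⟩
    · rw [(hE t ht).1]
      rcases Nat.lt_trichotomy t k with h' | rfl | h'
      · simp [show ¬ k + 1 ≤ t by omega, show ¬ k ≤ t by omega]
      · simp [show ¬ t + 1 ≤ t by omega, hFR, h]
      · simp [show k + 1 ≤ t by omega, show k ≤ t by omega]
    · rw [(hE t ht).2]
      rcases Nat.lt_trichotomy t k with h' | rfl | h'
      · simp [show ¬ k + 1 ≤ t by omega, show ¬ k ≤ t by omega]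
      · simp [show ¬ t + 1 ≤ t by omega, hFR, h]
      · simp [show k + 1 ≤ t by omega, show k ≤ t by omega]
  · rw [if_neg (by omega), if_pos h]
    refine ⟨by simpa using hl1, by simpa using hl2, fun t ht => ⟨?_, ?_⟩⟩
    · rw [hr2, PySem.List.pySetD_natCast]
      rcases Nat.lt_trichotomy t k with h' | rfl | h'
      · rw [getD_set_ne _ _ _ _ (by omega), (hE t ht).1]
        simp [show ¬ k + 1 ≤ t by omega, show ¬ k ≤ t by omega]
      · rw [getD_set_eq _ _ _ (by omega : t < s.1.length)]
        simp [hFR, h]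
      · rw [getD_set_ne _ _ _ _ (by omega), (hE t ht).1]
        simp [show k + 1 ≤ t by omega, show k ≤ t by omega]
    · rw [(hE t ht).2]
      rcases Nat.lt_trichotomy t k with h' | rfl | h'
      · simp [show ¬ k + 1 ≤ t by omega, show ¬ k ≤ t by omega]
      · simp [show ¬ t + 1 ≤ t by omega, hFR, not_lt_of_gt h]
      · simp [show k + 1 ≤ t by omega, show k ≤ t by omega]

lemma invR_fold (xs : List Int) : ∀ (k : ℕ) (s : List Int × List Int),
    k ≤ xs.length - 1 → InvR xs k s →
    InvR xs 0 ((PySem.List.pyRange ((k : Int) - 1) (-1) (-1)).foldl (aBwdStep xs) s) := by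
  intro k
  induction k with
  | zero =>
      intro s _ hs
      rw [PySem.List.pyRange_neg_one_eq_nil (by omega)]
      exact hs
  | succ k ih =>
      intro s hk hs
      rw [show (((k+1 : ℕ)) : Int) - 1 = (k : Int) by push_cast; ring,
        PySem.List.pyRange_neg_one_cons (by omega)]
      simp only [List.foldl_cons]
      rw [show (k : Int) - 1 = (k : Int) - 1 by rfl]
      exact ih _ (by omega) (invR_step xs k s (by omega) hs)


-- positivity
lemma FL_pos (xs : List Int) (t : ℕ) : 1 ≤ (FL xs t).1 ∧ 1 ≤ (FL xs t).2 := by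
  induction t with
  | zero => simp [FL]
  | succ t ih => constructor <;> simp only [FL] <;> split <;> omega

lemma FR_pos (xs : List Int) (t : ℕ) : 1 ≤ (FR xs t).1 ∧ 1 ≤ (FR xs t).2 := by
  by_cases h : t + 1 < xs.length
  · have := FR_pos xs (t + 1)
    rw [FR]
    simp only [h, dite_true]
    constructor <;> split <;> omega
  · rw [FR]; simp [h]
termination_by xs.length - t

-- the two middle entries of Bbest's step are FL at t+1
lemma Bbest_succ (xs : List Int) (t : ℕ) :
    Bbest xs (t + 1) = max (Bbest xs t)
      (max (FL xs (t+1)).2 (max (FL xs (t+1)).1 (max (GB xs (t+1)).1 (GB xs (t+1)).2))) := by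
  simp only [Bbest, FL]

lemma Bbest_pos (xs : List Int) (t : ℕ) : 1 ≤ Bbest xs t := by
  induction t with
  | zero => simp [Bbest]
  | succ t ih => rw [Bbest_succ]; omega

lemma Bbest_mono (xs : List Int) {a b : ℕ} (h : a ≤ b) : Bbest xs a ≤ Bbest xs b := by
  induction b with
  | zero => simp_all
  | succ b ih =>
      rcases Nat.eq_or_lt_of_le h with rfl | h'
      · exact le_refl _
      · rw [Bbest_succ]; have := ih (by omega); omega

lemma FL_le_Bbest (xs : List Int) (t k : ℕ) (h : t ≤ k) :
    (FL xs t).1 ≤ Bbest xs k ∧ (FL xs t).2 ≤ Bbest xs k := by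
  have hmono := Bbest_mono xs h
  rcases Nat.eq_zero_or_pos t with rfl | htp
  · have := Bbest_pos xs k; simp [FL]; omega
  · obtain ⟨t', rfl⟩ : ∃ t', t = t' + 1 := ⟨t - 1, by omega⟩
    rw [Bbest_succ] at hmono
    omega

lemma GB_le_Bbest (xs : List Int) (t k : ℕ) (h : t ≤ k) :
    (GB xs t).1 ≤ Bbest xs k ∧ (GB xs t).2 ≤ Bbest xs k := by
  have hmono := Bbest_mono xs h
  rcases Nat.eq_zero_or_pos t with rfl | htp
  · have := Bbest_pos xs k; simp [GB]; omega
  · obtain ⟨t', rfl⟩ : ∃ t', t = t' + 1 := ⟨t - 1, by omega⟩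
    rw [Bbest_succ] at hmono
    omega

-- step identities
lemma FR_step_lt (xs : List Int) (t : ℕ) (h : t + 1 < xs.length) (hc : gEl xs t < gEl xs (t+1)) :
    (FR xs t).2 = (FR xs (t+1)).1 + 1 ∧ (FR xs t).1 = 1 := by
  rw [FR]; simp [h, hc, not_lt_of_gt hc]

lemma FR_step_gt (xs : List Int) (t : ℕ) (h : t + 1 < xs.length) (hc : gEl xs t > gEl xs (t+1)) :
    (FR xs t).1 = (FR xs (t+1)).2 + 1 ∧ (FR xs t).2 = 1 := by
  rw [FR]; simp [h, hc, not_lt_of_gt hc]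

lemma FR_last (xs : List Int) (t : ℕ) (h : ¬ t + 1 < xs.length) : FR xs t = (1, 1) := by
  rw [FR]; simp [h]

lemma FR_eq_one_of_not_lt (xs : List Int) (t : ℕ) (hc : ¬ gEl xs t < gEl xs (t+1)) :
    (FR xs t).2 = 1 := by
  by_cases h : t + 1 < xs.length
  · rw [FR]; simp [h, hc]
  · rw [FR_last xs t h]

lemma FR_eq_one_of_not_gt (xs : List Int) (t : ℕ) (hc : ¬ gEl xs t > gEl xs (t+1)) :
    (FR xs t).1 = 1 := by
  by_cases h : t + 1 < xs.length
  · rw [FR]; simp [h, hc]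
  · rw [FR_last xs t h]

lemma FL_step_lt (xs : List Int) (t : ℕ) (hc : gEl xs t < gEl xs (t+1)) :
    (FL xs (t+1)).2 = (FL xs t).1 + 1 := by
  simp [FL, hc]

lemma FL_step_gt (xs : List Int) (t : ℕ) (hc : gEl xs t > gEl xs (t+1)) :
    (FL xs (t+1)).1 = (FL xs t).2 + 1 := by
  simp [FL, hc]

-- closed form for GB's step: each component is a max of an extension and a seed candidate
lemma GB_succ_1 (xs : List Int) (t : ℕ) :
    (GB xs (t+1)).1 = max (if gEl xs t < gEl xs (t+1) ∧ (GB xs t).2 > 0 then (GB xs t).2 + 1 else 0)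
        (if 1 ≤ t ∧ gEl xs (t-1) < gEl xs (t+1) then (FL xs (t-1)).1 + 1 else 0) := by
  have hnu1 : (0:Int) ≤ (if gEl xs t < gEl xs (t+1) ∧ (GB xs t).2 > 0 then (GB xs t).2 + 1 else 0) := by
    split <;> omega
  simp only [GB]
  by_cases ht : 1 ≤ t
  · rw [if_pos ht]
    rcases lt_trichotomy (gEl xs (t-1)) (gEl xs (t+1)) with h | h | h
    · rw [if_pos h]; dsimp only
      rw [if_pos (And.intro ht h)]
    · rw [if_neg (show ¬ gEl xs (t-1) < gEl xs (t+1) by omega),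
        if_neg (show ¬ gEl xs (t-1) > gEl xs (t+1) by omega)]; dsimp only
      rw [if_neg (show ¬ (1 ≤ t ∧ gEl xs (t-1) < gEl xs (t+1)) by rw [h]; simp)]
      exact (max_eq_left hnu1).symm
    · rw [if_neg (not_lt_of_gt h), if_pos h]; dsimp only
      rw [if_neg (show ¬ (1 ≤ t ∧ gEl xs (t-1) < gEl xs (t+1)) from
        fun hx => absurd hx.2 (not_lt_of_gt h))]
      exact (max_eq_left hnu1).symm
  · rw [if_neg ht]; dsimp only
    rw [if_neg (show ¬ (1 ≤ t ∧ gEl xs (t-1) < gEl xs (t+1)) from fun hx => ht hx.1)]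
    exact (max_eq_left hnu1).symm

lemma GB_succ_2 (xs : List Int) (t : ℕ) :
    (GB xs (t+1)).2 = max (if gEl xs t > gEl xs (t+1) ∧ (GB xs t).1 > 0 then (GB xs t).1 + 1 else 0)
        (if 1 ≤ t ∧ gEl xs (t-1) > gEl xs (t+1) then (FL xs (t-1)).2 + 1 else 0) := by
  have hnd1 : (0:Int) ≤ (if gEl xs t > gEl xs (t+1) ∧ (GB xs t).1 > 0 then (GB xs t).1 + 1 else 0) := by
    split <;> omega
  simp only [GB]
  by_cases ht : 1 ≤ t
  · rw [if_pos ht]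
    rcases lt_trichotomy (gEl xs (t-1)) (gEl xs (t+1)) with h | h | h
    · rw [if_pos h]; dsimp only
      rw [if_neg (show ¬ (1 ≤ t ∧ gEl xs (t-1) > gEl xs (t+1)) from
        fun hx => absurd hx.2 (not_lt_of_gt h))]
      exact (max_eq_left hnd1).symm
    · rw [if_neg (show ¬ gEl xs (t-1) < gEl xs (t+1) by omega),
        if_neg (show ¬ gEl xs (t-1) > gEl xs (t+1) by omega)]; dsimp only
      rw [if_neg (show ¬ (1 ≤ t ∧ gEl xs (t-1) > gEl xs (t+1)) by rw [h]; simp)]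
      exact (max_eq_left hnd1).symm
    · rw [if_neg (not_lt_of_gt h), if_pos h]; dsimp only
      rw [if_pos (And.intro ht h)]
  · rw [if_neg ht]; dsimp only
    rw [if_neg (show ¬ (1 ≤ t ∧ gEl xs (t-1) > gEl xs (t+1)) from fun hx => ht hx.1)]
    exact (max_eq_left hnd1).symm

lemma GB_ge_ext_lt (xs : List Int) (t : ℕ) (hc : gEl xs t < gEl xs (t+1))
    (hp : 0 < (GB xs t).2) : (GB xs t).2 + 1 ≤ (GB xs (t+1)).1 := by
  rw [GB_succ_1 xs t, if_pos (And.intro hc hp)]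
  exact le_max_left _ _

lemma GB_ge_ext_gt (xs : List Int) (t : ℕ) (hc : gEl xs t > gEl xs (t+1))
    (hp : 0 < (GB xs t).1) : (GB xs t).1 + 1 ≤ (GB xs (t+1)).2 := by
  rw [GB_succ_2 xs t, if_pos (And.intro hc hp)]
  exact le_max_left _ _

lemma GB_ge_seed_lt (xs : List Int) (t : ℕ) (ht : 1 ≤ t) (hc : gEl xs (t-1) < gEl xs (t+1)) :
    (FL xs (t-1)).1 + 1 ≤ (GB xs (t+1)).1 := by
  rw [GB_succ_1 xs t, if_pos (And.intro ht hc)]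
  exact le_max_right _ _

lemma GB_ge_seed_gt (xs : List Int) (t : ℕ) (ht : 1 ≤ t) (hc : gEl xs (t-1) > gEl xs (t+1)) :
    (FL xs (t-1)).2 + 1 ≤ (GB xs (t+1)).2 := by
  rw [GB_succ_2 xs t, if_pos (And.intro ht hc)]
  exact le_max_right _ _

-- chain lemma: a no-deletion run bound propagates forward along FR
lemma chain_FL (xs : List Int) : ∀ (fuel t : ℕ), xs.length - t ≤ fuel → t < xs.length →
    ∀ a : Int, (a ≤ (FL xs t).1 → a + (FR xs t).2 - 1 ≤ Bbest xs (xs.length - 1)) ∧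
               (a ≤ (FL xs t).2 → a + (FR xs t).1 - 1 ≤ Bbest xs (xs.length - 1)) := by
  intro fuel
  induction fuel with
  | zero => intro t h1 h2; omega
  | succ fuel ih =>
      intro t h1 h2 a
      have hFLB := FL_le_Bbest xs t (xs.length - 1) (by omega)
      constructor
      · intro ha
        by_cases hlt : t + 1 < xs.length ∧ gEl xs t < gEl xs (t+1)
        · obtain ⟨hn, hc⟩ := hlt
          have hstep := FR_step_lt xs t hn hc
          have hfl := FL_step_lt xs t hc
          have := ((ih (t+1) (by omega) hn (a+1)).2) (by omega)
          omega
        · have : (FR xs t).2 = 1 := by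
            by_cases hn : t + 1 < xs.length
            · exact FR_eq_one_of_not_lt xs t (by tauto)
            · rw [FR_last xs t hn]
          omega
      · intro ha
        by_cases hlt : t + 1 < xs.length ∧ gEl xs t > gEl xs (t+1)
        · obtain ⟨hn, hc⟩ := hlt
          have hstep := FR_step_gt xs t hn hc
          have hfl := FL_step_gt xs t hc
          have := ((ih (t+1) (by omega) hn (a+1)).1) (by omega)
          omega
        · have : (FR xs t).1 = 1 := by
            by_cases hn : t + 1 < xs.length
            · exact FR_eq_one_of_not_gt xs t (by tauto)
            · rw [FR_last xs t hn]
          omega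

-- chain lemma: a one-deletion run bound propagates forward along FR
lemma chain_GB (xs : List Int) : ∀ (fuel t : ℕ), xs.length - t ≤ fuel → t < xs.length →
    ∀ a : Int, 0 < a →
      (a ≤ (GB xs t).1 → a + (FR xs t).1 - 1 ≤ Bbest xs (xs.length - 1)) ∧
      (a ≤ (GB xs t).2 → a + (FR xs t).2 - 1 ≤ Bbest xs (xs.length - 1)) := by
  intro fuel
  induction fuel with
  | zero => intro t h1 h2; omega
  | succ fuel ih =>
      intro t h1 h2 a hapos
      have hGBB := GB_le_Bbest xs t (xs.length - 1) (by omega)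
      constructor
      · intro ha
        by_cases hlt : t + 1 < xs.length ∧ gEl xs t > gEl xs (t+1)
        · obtain ⟨hn, hc⟩ := hlt
          have hstep := FR_step_gt xs t hn hc
          have hext := GB_ge_ext_gt xs t hc (by omega)
          have := ((ih (t+1) (by omega) hn (a+1) (by omega)).2) (by omega)
          omega
        · have : (FR xs t).1 = 1 := by
            by_cases hn : t + 1 < xs.length
            · exact FR_eq_one_of_not_gt xs t (by tauto)
            · rw [FR_last xs t hn]
          omega
      · intro ha
        by_cases hlt : t + 1 < xs.length ∧ gEl xs t < gEl xs (t+1)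
        · obtain ⟨hn, hc⟩ := hlt
          have hstep := FR_step_lt xs t hn hc
          have hext := GB_ge_ext_lt xs t hc (by omega)
          have := ((ih (t+1) (by omega) hn (a+1) (by omega)).1) (by omega)
          omega
        · have : (FR xs t).2 = 1 := by
            by_cases hn : t + 1 < xs.length
            · exact FR_eq_one_of_not_lt xs t (by tauto)
            · rw [FR_last xs t hn]
          omega

-- corollaries: everything A maximises is ≤ B's running best
lemma FR_le_Bbest (xs : List Int) (t : ℕ) (h : t < xs.length) :
    (FR xs t).1 ≤ Bbest xs (xs.length - 1) ∧ (FR xs t).2 ≤ Bbest xs (xs.length - 1) := by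
  have h1 := (chain_FL xs (xs.length - t) t (by omega) h 1).2 (FL_pos xs t).2
  have h2 := (chain_FL xs (xs.length - t) t (by omega) h 1).1 (FL_pos xs t).1
  omega

lemma merge_le_Bbest_gt (xs : List Int) (m : ℕ) (h1 : 1 ≤ m) (h2 : m + 1 < xs.length)
    (hc : gEl xs (m-1) > gEl xs (m+1)) :
    (FL xs (m-1)).2 + (FR xs (m+1)).2 ≤ Bbest xs (xs.length - 1) := by
  have hseed := GB_ge_seed_gt xs m h1 hc
  have hfl := FL_pos xs (m-1)
  have := (chain_GB xs (xs.length - (m+1)) (m+1) (by omega) h2 ((FL xs (m-1)).2 + 1)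
    (by omega)).2 hseed
  omega

lemma merge_le_Bbest_lt (xs : List Int) (m : ℕ) (h1 : 1 ≤ m) (h2 : m + 1 < xs.length)
    (hc : gEl xs (m-1) < gEl xs (m+1)) :
    (FL xs (m-1)).1 + (FR xs (m+1)).1 ≤ Bbest xs (xs.length - 1) := by
  have hseed := GB_ge_seed_lt xs m h1 hc
  have hfl := FL_pos xs (m-1)
  have := (chain_GB xs (xs.length - (m+1)) (m+1) (by omega) h2 ((FL xs (m-1)).1 + 1)
    (by omega)).1 hseed
  omega

-- the other direction: B's one-deletion states are bounded by A's merge candidates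
lemma GB_le_merge (xs : List Int) (M : Int)
    (hgt : ∀ m : ℕ, 1 ≤ m → m + 1 < xs.length → gEl xs (m-1) > gEl xs (m+1) →
      (FL xs (m-1)).2 + (FR xs (m+1)).2 ≤ M)
    (hlt : ∀ m : ℕ, 1 ≤ m → m + 1 < xs.length → gEl xs (m-1) < gEl xs (m+1) →
      (FL xs (m-1)).1 + (FR xs (m+1)).1 ≤ M) :
    ∀ t : ℕ, t < xs.length →
      ((GB xs t).1 = 0 ∨ (GB xs t).1 + (FR xs t).1 - 1 ≤ M) ∧
      ((GB xs t).2 = 0 ∨ (GB xs t).2 + (FR xs t).2 - 1 ≤ M) := by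
  intro t
  induction t with
  | zero => intro _; simp [GB]
  | succ t ih =>
      intro ht
      have iht := ih (by omega)
      have hFRpos := FR_pos xs (t+1)
      have hflp := FL_pos xs (t-1)
      constructor
      · rw [GB_succ_1 xs t]
        by_cases hext : gEl xs t < gEl xs (t+1) ∧ 0 < (GB xs t).2
        · have hstep := FR_step_lt xs t ht hext.1
          have hbound : (GB xs t).2 + (FR xs t).2 - 1 ≤ M := by
            rcases iht.2 with h0 | h0
            · omega
            · exact h0
          rw [if_pos hext]
          by_cases hseed : 1 ≤ t ∧ gEl xs (t-1) < gEl xs (t+1)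
          · have hs := hlt t hseed.1 (by omega) hseed.2
            rw [if_pos hseed]; right
            rw [max_def]; split <;> omega
          · rw [if_neg hseed]; right
            rw [max_def]; split <;> omega
        · rw [if_neg hext]
          by_cases hseed : 1 ≤ t ∧ gEl xs (t-1) < gEl xs (t+1)
          · have hs := hlt t hseed.1 (by omega) hseed.2
            rw [if_pos hseed]; right
            rw [max_def]; split <;> omega
          · rw [if_neg hseed]; left; simp
      · rw [GB_succ_2 xs t]
        by_cases hext : gEl xs t > gEl xs (t+1) ∧ 0 < (GB xs t).1
        · have hstep := FR_step_gt xs t ht hext.1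
          have hbound : (GB xs t).1 + (FR xs t).1 - 1 ≤ M := by
            rcases iht.1 with h0 | h0
            · omega
            · exact h0
          rw [if_pos hext]
          by_cases hseed : 1 ≤ t ∧ gEl xs (t-1) > gEl xs (t+1)
          · have hs := hgt t hseed.1 (by omega) hseed.2
            rw [if_pos hseed]; right
            rw [max_def]; split <;> omega
          · rw [if_neg hseed]; right
            rw [max_def]; split <;> omega
        · rw [if_neg hext]
          by_cases hseed : 1 ≤ t ∧ gEl xs (t-1) > gEl xs (t+1)
          · have hs := hgt t hseed.1 (by omega) hseed.2
            rw [if_pos hseed]; right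
            rw [max_def]; split <;> omega
          · rw [if_neg hseed]; left; simp

-- max(list) plumbing
lemma max?_getD_le (l : List Int) (c : Int) (h : ∀ y ∈ l, y ≤ c) :
    (PySem.List.max? l (fun y => y)).getD 0 ≤ c ∨ l = [] := by
  rcases hm : PySem.List.max? l (fun y => y) with _ | m
  · right; exact (PySem.List.max?_eq_none_iff l _).mp hm
  · left; simpa using h m (PySem.List.max?_mem hm)

lemma le_max?_getD (l : List Int) (y : Int) (hy : y ∈ l) :
    y ≤ (PySem.List.max? l (fun y => y)).getD 0 := by
  rcases hm : PySem.List.max? l (fun y => y) with _ | m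
  · rw [(PySem.List.max?_eq_none_iff l _).mp hm] at hy; simp at hy
  · simpa using PySem.List.max?_isMax hm y hy

-- evaluating A's merge step at a natural index
lemma mergeStep_eval (nums Li Ld Ri Rd : List Int) (m : Int) (j : ℕ) (hj : 1 ≤ j) :
    aMergeStep nums Li Ld Ri Rd m (j : Int) =
      if gEl nums (j-1) > gEl nums (j+1) then max m (Ld.getD (j-1) 0 + Rd.getD (j+1) 0)
      else if gEl nums (j-1) < gEl nums (j+1) then max m (Li.getD (j-1) 0 + Ri.getD (j+1) 0)
      else m := by
  unfold aMergeStep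
  rw [show ((j : Int) - 1) = ((j - 1 : ℕ) : Int) by omega,
    show ((j : Int) + 1) = ((j + 1 : ℕ) : Int) by push_cast; ring]
  simp only [PySem.List.pyGetD_natCast]
  rfl

lemma mergeStep_ge (nums Li Ld Ri Rd : List Int) : ∀ (m i : Int),
    m ≤ aMergeStep nums Li Ld Ri Rd m i := by
  intro m i
  unfold aMergeStep
  split_ifs <;> simp

-- B's running best is bounded by any common bound of its ingredients
lemma Bbest_le_of (xs : List Int) (Av : Int) (N : ℕ)
    (hFL : ∀ t, t ≤ N → (FL xs t).1 ≤ Av ∧ (FL xs t).2 ≤ Av)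
    (hGB : ∀ t, t ≤ N → (GB xs t).1 ≤ Av ∧ (GB xs t).2 ≤ Av)
    (h1 : 1 ≤ Av) : ∀ k, k ≤ N → Bbest xs k ≤ Av := by
  intro k
  induction k with
  | zero => intro _; simpa [Bbest] using h1
  | succ k ih =>
      intro hk
      rw [Bbest_succ]
      have h2 := hFL (k+1) hk
      have h3 := hGB (k+1) hk
      have h4 := ih (by omega)
      omega


-- main equality for lists of length ≥ 2
lemma A_eq_B (nums : List Int) (hn2 : 2 ≤ nums.length) :
    longestAlternating nums = Bbest nums (nums.length - 1) := by
  have hne : nums ≠ [] := by intro h; rw [h] at hn2; simp at hn2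
  simp only [longestAlternating]
  rw [if_neg (by omega : ¬ nums.length = 1)]
  rw [show ((nums.length : Int) - 2) = (((nums.length - 1 : ℕ) : Int)) - 1 by omega]
  -- invariants for the two array-building passes
  obtain ⟨hF1len, hF2len, hEF⟩ := invF_fold nums nums.length (le_refl _) (by omega)
  have hR0 : InvR nums (nums.length - 1)
      (List.replicate nums.length 1, List.replicate nums.length 1) := by
    refine ⟨by simp, by simp, fun t ht => ?_⟩
    by_cases h : nums.length - 1 ≤ t
    · have : t = nums.length - 1 := by omega
      subst this
      rw [FR_last nums _ (by omega)]
      simp [ht]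
    · simp [ht, show ¬ nums.length - 1 ≤ t from h]
  obtain ⟨hR1len, hR2len, hER⟩ :=
    invR_fold nums (nums.length - 1) _ (le_refl _) hR0
  set N := nums.length with hN
  set F := (PySem.List.pyRange 1 (N : Int) 1).foldl (aFwdStep nums)
    (List.replicate N 1, List.replicate N 1) with hFdef
  set R := (PySem.List.pyRange (((N - 1 : ℕ) : Int) - 1) (-1) (-1)).foldl (aBwdStep nums)
    (List.replicate N 1, List.replicate N 1) with hRdef
  have eF1 : ∀ t, t < N → F.1.getD t 0 = (FL nums t).1 := fun t ht => by
    have := (hEF t ht).1; rw [this, if_pos ht]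
  have eF2 : ∀ t, t < N → F.2.getD t 0 = (FL nums t).2 := fun t ht => by
    have := (hEF t ht).2; rw [this, if_pos ht]
  have eR1 : ∀ t, t < N → R.1.getD t 0 = (FR nums t).1 := fun t ht => by
    have := (hER t ht).1; rw [this, if_pos (Nat.zero_le t)]
  have eR2 : ∀ t, t < N → R.2.getD t 0 = (FR nums t).2 := fun t ht => by
    have := (hER t ht).2; rw [this, if_pos (Nat.zero_le t)]
  set B := Bbest nums (N - 1) with hBdef
  set M0 := max (max ((PySem.List.max? F.1 (fun y => y)).getD 0)
                     ((PySem.List.max? F.2 (fun y => y)).getD 0))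
                (max ((PySem.List.max? R.1 (fun y => y)).getD 0)
                     ((PySem.List.max? R.2 (fun y => y)).getD 0)) with hM0
  apply le_antisymm
  · apply foldl_le_bound
    · intro m i hi hm
      obtain ⟨hi1, hi2⟩ := PySem.List.mem_pyRange_one.mp hi
      obtain ⟨j, rfl⟩ : ∃ j : ℕ, i = (j : Int) := ⟨i.toNat, (Int.toNat_of_nonneg (by omega)).symm⟩
      have hj1 : 1 ≤ j := by omega
      have hj2 : j + 1 < N := by omega
      rw [mergeStep_eval nums F.1 F.2 R.1 R.2 m j hj1,
        eF1 (j-1) (by omega), eF2 (j-1) (by omega), eR1 (j+1) (by omega), eR2 (j+1) (by omega)]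
      split_ifs with hgt hlt
      · exact max_le hm (merge_le_Bbest_gt nums j hj1 hj2 hgt)
      · exact max_le hm (merge_le_Bbest_lt nums j hj1 hj2 hlt)
      · exact hm
    · have hup : ∀ (l : List Int) (comp : ℕ → Int), l.length = N →
          (∀ t, t < N → l.getD t 0 = comp t) → (∀ t, t < N → comp t ≤ B) →
          (PySem.List.max? l (fun y => y)).getD 0 ≤ B := by
        intro l comp hlen hcomp hble
        have hbd : ∀ y ∈ l, y ≤ B := by
          intro y hy
          obtain ⟨t, ht, hteq⟩ := mem_getD l y hy
          rw [hlen] at ht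
          rw [← hteq, hcomp t ht]
          exact hble t ht
        rcases max?_getD_le l B hbd with h | h
        · exact h
        · exfalso; rw [h] at hlen; simp at hlen; omega
      refine max_le (max_le (hup F.1 (fun t => (FL nums t).1) hF1len eF1 ?_)
          (hup F.2 (fun t => (FL nums t).2) hF2len eF2 ?_))
        (max_le (hup R.1 (fun t => (FR nums t).1) hR1len eR1 ?_)
          (hup R.2 (fun t => (FR nums t).2) hR2len eR2 ?_))
      · intro t ht; exact (FL_le_Bbest nums t (N-1) (by omega)).1
      · intro t ht; exact (FL_le_Bbest nums t (N-1) (by omega)).2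
      · intro t ht; exact (FR_le_Bbest nums t ht).1
      · intro t ht; exact (FR_le_Bbest nums t ht).2
  · set Av := (PySem.List.pyRange 1 ((N : Int) - 1) 1).foldl
      (aMergeStep nums F.1 F.2 R.1 R.2) M0 with hAvdef
    have hinit : M0 ≤ Av := foldl_ge_init _ (mergeStep_ge nums F.1 F.2 R.1 R.2) _ M0
    have hcandgt : ∀ j : ℕ, 1 ≤ j → j + 1 < N → gEl nums (j-1) > gEl nums (j+1) →
        (FL nums (j-1)).2 + (FR nums (j+1)).2 ≤ Av := by
      intro j hj1 hj2 hc
      apply foldl_elem_le _ (mergeStep_ge nums F.1 F.2 R.1 R.2) _ (j : Int) _ ?_ M0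
        (PySem.List.mem_pyRange_one.mpr ⟨by omega, by omega⟩)
      intro m
      rw [mergeStep_eval nums F.1 F.2 R.1 R.2 m j hj1, eF2 (j-1) (by omega),
        eR2 (j+1) (by omega), if_pos hc]
      exact le_max_right _ _
    have hcandlt : ∀ j : ℕ, 1 ≤ j → j + 1 < N → gEl nums (j-1) < gEl nums (j+1) →
        (FL nums (j-1)).1 + (FR nums (j+1)).1 ≤ Av := by
      intro j hj1 hj2 hc
      apply foldl_elem_le _ (mergeStep_ge nums F.1 F.2 R.1 R.2) _ (j : Int) _ ?_ M0
        (PySem.List.mem_pyRange_one.mpr ⟨by omega, by omega⟩)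
      intro m
      rw [mergeStep_eval nums F.1 F.2 R.1 R.2 m j hj1, eF1 (j-1) (by omega),
        eR1 (j+1) (by omega), if_neg (not_lt_of_gt hc), if_pos hc]
      exact le_max_right _ _
    have hFLle : ∀ t, t ≤ N - 1 → (FL nums t).1 ≤ Av ∧ (FL nums t).2 ≤ Av := by
      intro t ht
      constructor
      · refine le_trans ?_ (le_trans (le_trans (le_max_left _ _) (le_max_left _ _)) hinit)
        rw [← eF1 t (by omega)]
        exact le_max?_getD F.1 _ (getD_mem F.1 t (by rw [hF1len]; omega))
      · refine le_trans ?_ (le_trans (le_trans (le_max_right _ _) (le_max_left _ _)) hinit)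
        rw [← eF2 t (by omega)]
        exact le_max?_getD F.2 _ (getD_mem F.2 t (by rw [hF2len]; omega))
    have h1Av : 1 ≤ Av := by
      have := (hFLle 0 (by omega)).1
      simpa [FL] using this
    have hGBle : ∀ t, t ≤ N - 1 → (GB nums t).1 ≤ Av ∧ (GB nums t).2 ≤ Av := by
      intro t ht
      have hfr := FR_pos nums t
      obtain ⟨h1, h2⟩ := GB_le_merge nums Av hcandgt hcandlt t (by omega)
      constructor
      · rcases h1 with h0 | h0 <;> omega
      · rcases h2 with h0 | h0 <;> omega
    exact Bbest_le_of nums Av (N - 1) hFLle hGBle h1Av (N - 1) le_rfl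
-- ===== VERDICT (by name: the statement is the Claim_ definition above) =====
theorem longestAlternating_spec : Claim_equal_longestAlternating := by
  intro nums _ hpre
  unfold Spec_longestAlternating
  have hn : 1 ≤ nums.length := List.length_pos_iff.mpr hpre
  rw [b_val nums hpre]
  by_cases h1 : nums.length = 1
  · simp only [longestAlternating]
    rw [if_pos h1, h1]
    simp [Bbest]
  · exact A_eq_B nums (by omega)
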